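-- pv_equiv track=rewrite | github.com/andreasjansson/vastgotalatar | process.py | cleanup_parens_parts
-- ===== SOURCE A (Python) =====
-- def cleanup_parens_parts(parts):
--     if "(" not in ", ".join(parts):
--         return parts
--
--     clean_parts = []
--     cur_part = []
--     for part in parts:
--         cur_part.append(part)
--         if ")" in part:
--             clean_parts.append(", ".join(cur_part).split("(")[0].strip(" ,"))
--             cur_part = []
--
--     if cur_part:
--         clean_parts.append(", ".join(cur_part))
--
--     return clean_parts
-- ===== SOURCE B (Python) =====
-- def cleanup_parens_parts(parts):
--     if "(" not in ", ".join(parts):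
--         return parts
--     return _paren_groups(parts)
--
--
-- def _paren_groups(parts):
--     # Split off the prefix up to (and including) the first part containing ")",
--     # clean it, and recurse on the remainder; a closer-less tail is joined raw.
--     for i, part in enumerate(parts):
--         if ")" in part:
--             head = ", ".join(parts[:i + 1]).split("(")[0].strip(" ,")
--             return [head] + _paren_groups(parts[i + 1:])
--     return [", ".join(parts)] if parts else []
-- ===== Notes on version B (the rewrite author's own statement) =====
-- stated objective: alternative
-- what changed: Replaces A's single pass with a mutable clean_parts/cur_part accumulator pair by a recursive decomposition that repeatedly splits off the prefix up to the first part containing ')', cleans it, and recurses on the remainder (closer-less tail joined raw).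
import Mathlib
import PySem

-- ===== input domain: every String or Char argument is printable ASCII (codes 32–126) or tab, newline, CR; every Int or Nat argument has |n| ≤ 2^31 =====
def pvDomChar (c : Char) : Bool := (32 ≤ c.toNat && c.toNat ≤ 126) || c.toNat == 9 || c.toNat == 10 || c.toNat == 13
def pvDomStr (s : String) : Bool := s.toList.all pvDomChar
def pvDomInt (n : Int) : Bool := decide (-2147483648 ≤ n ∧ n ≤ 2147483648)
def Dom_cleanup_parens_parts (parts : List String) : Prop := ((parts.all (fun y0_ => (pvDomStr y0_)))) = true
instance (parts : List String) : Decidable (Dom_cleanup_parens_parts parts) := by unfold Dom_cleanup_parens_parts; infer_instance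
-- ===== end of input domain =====

-- B replaces A's running clean_parts/cur_part accumulator loop with a recursive
-- decomposition: split off the prefix up to the first part containing ")", clean it,
-- and recurse on the remainder (objective: alternative decomposition, same cost).

-- ", ".join(g).split("(")[0].strip(" ,")  — the identical cleaning expression both
-- Pythons contain, kept as one shared helper (split("(") never returns an empty
-- list, so the headD default is never used)
def pvCleanGroup (g : List String) : String :=
  PySem.Str.stripChars
    (((PySem.Str.split? (PySem.Str.join ", " g) "(").getD []).headD "") " ,"

-- ===== PORT A =====
-- the loop body: cur_part.append(part); if ")" in part: emit cleaned group
def pvStepA (s : List String × List String) (part : String) : List String × List String :=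
  let cur := s.2 ++ [part]
  if PySem.Str.isIn ")" part then (s.1 ++ [pvCleanGroup cur], []) else (s.1, cur)

def cleanup_parens_parts (parts : List String) : List String :=
  if PySem.Str.isIn "(" (PySem.Str.join ", " parts) = false then parts
  else
    let st := parts.foldl pvStepA ([], [])
    if st.2 = [] then st.1 else st.1 ++ [PySem.Str.join ", " st.2]

-- ===== PORT B =====
-- 'for i, part in enumerate(parts): if ")" in part: return parts[:i+1], parts[i+1:]'
-- (the scanned prefix is carried in pre)
def pvSplitAtCloser (pre : List String) : List String → Option (List String × List String)
  | [] => none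
  | p :: rest =>
    if PySem.Str.isIn ")" p then some (pre ++ [p], rest) else pvSplitAtCloser (pre ++ [p]) rest

theorem pvSplitAtCloser_rest_lt :
    ∀ (parts pre g rest : List String),
      pvSplitAtCloser pre parts = some (g, rest) → rest.length < parts.length := by
  intro parts
  induction parts with
  | nil => intro pre g rest h; simp [pvSplitAtCloser] at h
  | cons p t ih =>
    intro pre g rest h
    by_cases hp : PySem.Chars.isIn [')'] p.toList = true
    · simp only [pvSplitAtCloser] at h
      simp [hp] at h
      simp [← h.2]
    · simp only [pvSplitAtCloser] at h
      simp [hp] at h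
      exact Nat.lt_trans (ih _ _ _ h) (by simp)

def pvParenGroups (parts : List String) : List String :=
  match h : pvSplitAtCloser [] parts with
  | none => if parts = [] then [] else [PySem.Str.join ", " parts]
  | some (g, rest) => pvCleanGroup g :: pvParenGroups rest
termination_by parts.length
decreasing_by exact pvSplitAtCloser_rest_lt _ _ _ _ h

def cleanup_parens_parts_alt (parts : List String) : List String :=
  if PySem.Str.isIn "(" (PySem.Str.join ", " parts) = false then parts
  else pvParenGroups parts

-- ===== PRECONDITION & SPEC =====
def Spec_cleanup_parens_parts (parts : List String) (out : List String) : Prop := out = cleanup_parens_parts_alt parts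
instance (parts : List String) (out : List String) : Decidable (Spec_cleanup_parens_parts parts out) := by unfold Spec_cleanup_parens_parts; infer_instance

-- ===== CLAIM (what is proved, stated in full; the proofs are below) =====
def Claim_equal_cleanup_parens_parts : Prop := ∀ (parts : List String), Dom_cleanup_parens_parts parts → Spec_cleanup_parens_parts parts (cleanup_parens_parts parts)

-- ===== LEMMAS AND PROOFS =====

-- common reference form: recursion with a pending (not yet closed) prefix
def pvAltGo (pre : List String) : List String → List String
  | [] => if pre = [] then [] else [PySem.Str.join ", " pre]
  | p :: rest =>
    if PySem.Str.isIn ")" p then pvCleanGroup (pre ++ [p]) :: pvAltGo [] rest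
    else pvAltGo (pre ++ [p]) rest

theorem pvLoopA_eq_altGo :
    ∀ (parts acc cur : List String),
      (if (parts.foldl pvStepA (acc, cur)).2 = [] then (parts.foldl pvStepA (acc, cur)).1
       else (parts.foldl pvStepA (acc, cur)).1 ++ [PySem.Str.join ", " (parts.foldl pvStepA (acc, cur)).2])
      = acc ++ pvAltGo cur parts := by
  intro parts
  induction parts with
  | nil =>
    intro acc cur
    by_cases h : cur = [] <;> simp [pvAltGo, h]
  | cons p rest ih =>
    intro acc cur
    by_cases hp : PySem.Chars.isIn [')'] p.toList = true
    · simp only [List.foldl_cons, pvStepA, PySem.Str.isIn_eq]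
      rw [ih]
      simp [pvAltGo, hp]
    · simp only [List.foldl_cons, pvStepA, PySem.Str.isIn_eq]
      rw [ih]
      simp [pvAltGo, hp]

theorem pvAltGo_split :
    ∀ (parts pre : List String),
      pvAltGo pre parts =
        (match pvSplitAtCloser pre parts with
         | none => if pre ++ parts = [] then [] else [PySem.Str.join ", " (pre ++ parts)]
         | some (g, rest) => pvCleanGroup g :: pvAltGo [] rest) := by
  intro parts
  induction parts with
  | nil => intro pre; simp [pvSplitAtCloser, pvAltGo]
  | cons p rest ih =>
    intro pre
    by_cases hp : PySem.Chars.isIn [')'] p.toList = true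
    · simp [pvSplitAtCloser, pvAltGo, hp]
    · rw [show pvAltGo pre (p :: rest) = pvAltGo (pre ++ [p]) rest by simp [pvAltGo, hp]]
      rw [ih (pre ++ [p])]
      rw [show pvSplitAtCloser pre (p :: rest) = pvSplitAtCloser (pre ++ [p]) rest by
        simp [pvSplitAtCloser, hp]]
      cases hs : pvSplitAtCloser (pre ++ [p]) rest with
      | none => simp
      | some v => rfl

theorem pvParenGroups_eq_altGo :
    ∀ (n : Nat) (parts : List String), parts.length ≤ n → pvParenGroups parts = pvAltGo [] parts := by
  intro n
  induction n with
  | zero =>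
    intro parts h
    have hnil : parts = [] := by cases parts with
      | nil => rfl
      | cons a t => simp at h
    subst hnil
    rw [pvParenGroups]
    rfl
  | succ n ih =>
    intro parts h
    rw [pvParenGroups, pvAltGo_split parts []]
    cases hs : pvSplitAtCloser [] parts with
    | none => simp
    | some v =>
      obtain ⟨g, rest⟩ := v
      have hlt := pvSplitAtCloser_rest_lt parts [] g rest hs
      simp only []
      rw [ih rest (by omega)]

-- ===== VERDICT (by name: the statement is the Claim_ definition above) =====
theorem cleanup_parens_parts_spec : Claim_equal_cleanup_parens_parts := by
  intro parts _
  unfold Spec_cleanup_parens_parts cleanup_parens_parts cleanup_parens_parts_alt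
  by_cases hg : PySem.Chars.isIn ['('] (PySem.Chars.join [',', ' '] (parts.map String.toList)) = false
  · simp [hg]
  · simp [hg]
    rw [pvParenGroups_eq_altGo parts.length parts (le_refl _)]
    exact pvLoopA_eq_altGo parts [] []
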